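-- pv_equiv track=rewrite | github.com/jcpayne/image_bbox_tiler | image_bbox_slicer/main.py | __get_rowcol_indexes
-- ===== SOURCE A (Python) =====
-- def __get_rowcol_indexes(tiles,tile):
--     """
--     Private method.
--     Finds the row and column index for a given tile by searching for the tile's
--     coordinates in a list of all tile coordinates.
--
--     Parameters
--     ----------
--     tiles : a list of tuples (xmin,ymin,xmax,ymax) that define a tile
--     tile : a tuple for one particular tile
--     Returns:
--     ----------
--     (rownum,colnum): tuple.  The row and column index of the tile passed in
--
--     """
--     #Get list of unique row and col coordinates
--     x1 = sorted(set([i[0] for i in tiles]))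
--     x2 = sorted(set([i[1] for i in tiles]))
--     x3 = sorted(set([i[2] for i in tiles]))
--     x4 = sorted(set([i[3] for i in tiles]))
--     cols = list(zip(x1,x3)) #enclose iterable zip in list() to make reusable
--     rows = list(zip(x2,x4))
--
--     #Find a particular tile's coordinates in the list
--     colnum  = [n for (n,tpl) in enumerate(cols) if (tile[0],tile[2]) == tpl]
--     rownum = [n for (n,tpl) in enumerate(rows) if (tile[1],tile[3]) == tpl]
--     return (rownum,colnum)
-- ===== SOURCE B (Python) =====
-- def __get_rowcol_indexes(tiles, tile):
--     # B: sort-then-adjacent-dedup for the unique coordinate lists, and a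
--     # hand-written binary search instead of A's linear enumerate scan.
--     def dedup_sorted(vals):
--         vs = sorted(vals)
--         out = []
--         for v in vs:
--             if not out or out[-1] != v:
--                 out.append(v)
--         return out
--
--     def bsearch(lst, target):
--         lo, hi = 0, len(lst)
--         while lo < hi:
--             mid = (lo + hi) // 2
--             if lst[mid] < target:
--                 lo = mid + 1
--             else:
--                 hi = mid
--         return [lo] if lo < len(lst) and lst[lo] == target else []
--
--     x1 = dedup_sorted([i[0] for i in tiles])
--     x2 = dedup_sorted([i[1] for i in tiles])
--     x3 = dedup_sorted([i[2] for i in tiles])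
--     x4 = dedup_sorted([i[3] for i in tiles])
--     cols = list(zip(x1, x3))
--     rows = list(zip(x2, x4))
--
--     return (bsearch(rows, (tile[1], tile[3])), bsearch(cols, (tile[0], tile[2])))
-- ===== Notes on version B (the rewrite author's own statement) =====
-- stated objective: alternative
-- what changed: B builds each unique sorted coordinate list by sort-then-adjacent-dedup instead of sorted(set(...)), and locates the tile in the sorted rows/cols lists by a hand-written binary search instead of A's linear enumerate scan.
import Mathlib
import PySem

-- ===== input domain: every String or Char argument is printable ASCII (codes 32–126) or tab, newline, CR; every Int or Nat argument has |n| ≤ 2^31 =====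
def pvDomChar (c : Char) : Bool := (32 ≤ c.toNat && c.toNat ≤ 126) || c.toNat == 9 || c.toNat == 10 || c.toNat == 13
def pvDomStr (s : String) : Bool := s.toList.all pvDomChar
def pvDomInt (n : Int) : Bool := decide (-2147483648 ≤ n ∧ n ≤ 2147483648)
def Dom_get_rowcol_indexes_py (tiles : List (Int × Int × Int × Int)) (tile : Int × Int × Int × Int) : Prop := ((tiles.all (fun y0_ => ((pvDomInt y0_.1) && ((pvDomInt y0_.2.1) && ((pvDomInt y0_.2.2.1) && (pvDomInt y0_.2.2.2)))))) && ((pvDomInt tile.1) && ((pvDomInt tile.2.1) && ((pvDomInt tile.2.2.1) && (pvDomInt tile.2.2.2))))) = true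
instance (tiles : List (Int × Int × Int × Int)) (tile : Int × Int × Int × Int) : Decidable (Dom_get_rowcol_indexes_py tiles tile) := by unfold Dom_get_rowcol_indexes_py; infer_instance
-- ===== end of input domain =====

-- B replaces A's sorted(set(...)) by sort-then-adjacent-dedup and A's linear enumerate scan
-- by a binary search on the sorted cols/rows lists (objective: alternative, same asymptotic cost).

-- ===== PORT A =====
def get_rowcol_indexes_py (tiles : List (Int × Int × Int × Int)) (tile : Int × Int × Int × Int) : List Int × List Int :=
  let x1 := PySem.List.sorted (PySem.Set.ofList (tiles.map (fun i => i.1))) (fun x => x) false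
  let x2 := PySem.List.sorted (PySem.Set.ofList (tiles.map (fun i => i.2.1))) (fun x => x) false
  let x3 := PySem.List.sorted (PySem.Set.ofList (tiles.map (fun i => i.2.2.1))) (fun x => x) false
  let x4 := PySem.List.sorted (PySem.Set.ofList (tiles.map (fun i => i.2.2.2))) (fun x => x) false
  let cols := x1.zip x3
  let rows := x2.zip x4
  let colnum := ((PySem.List.enumerate cols).filter (fun p => (tile.1, tile.2.2.1) == p.2)).map (fun p => p.1)
  let rownum := ((PySem.List.enumerate rows).filter (fun p => (tile.2.1, tile.2.2.2) == p.2)).map (fun p => p.1)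
  (rownum, colnum)

-- ===== PORT B =====
-- sorted(vals) then the adjacent-dedup for-loop (out[-1] is getLast?)
def pvDedupSorted (vals : List Int) : List Int :=
  (PySem.List.sorted vals (fun x => x) false).foldl
    (fun out v => if out.isEmpty || !(out.getLast? == some v) then out ++ [v] else out) []

-- Python tuple '<' on a pair of ints (exact: lexicographic)
def pvLexLt (a b : Int × Int) : Bool := a.1 < b.1 || (a.1 == b.1 && a.2 < b.2)

-- the while-loop of bsearch; lo, hi stay within 0..len so Nat is exact, and
-- (lo+hi)//2 on nonnegative ints is Nat division; lst[mid] is in range since lo ≤ mid < hi ≤ len (getD exact)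
def pvBsLoop (lst : List (Int × Int)) (target : Int × Int) (lo hi : Nat) : Nat :=
  if lo < hi then
    let mid := (lo + hi) / 2
    if pvLexLt (lst.getD mid (0, 0)) target then pvBsLoop lst target (mid + 1) hi
    else pvBsLoop lst target lo mid
  else lo
termination_by hi - lo
decreasing_by all_goals omega

def pvBsearch (lst : List (Int × Int)) (target : Int × Int) : List Int :=
  let lo := pvBsLoop lst target 0 lst.length
  -- lst[lo] only evaluated after the lo < len(lst) check, so getD is exact
  if lo < lst.length && lst.getD lo (0, 0) == target then [(lo : Int)] else []

def get_rowcol_indexes_py_alt (tiles : List (Int × Int × Int × Int)) (tile : Int × Int × Int × Int) : List Int × List Int :=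
  let x1 := pvDedupSorted (tiles.map (fun i => i.1))
  let x2 := pvDedupSorted (tiles.map (fun i => i.2.1))
  let x3 := pvDedupSorted (tiles.map (fun i => i.2.2.1))
  let x4 := pvDedupSorted (tiles.map (fun i => i.2.2.2))
  let cols := x1.zip x3
  let rows := x2.zip x4
  (pvBsearch rows (tile.2.1, tile.2.2.2), pvBsearch cols (tile.1, tile.2.2.1))

-- ===== PRECONDITION & SPEC =====
def Spec_get_rowcol_indexes_py (tiles : List (Int × Int × Int × Int)) (tile : Int × Int × Int × Int) (out : List Int × List Int) : Prop := out = get_rowcol_indexes_py_alt tiles tile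
instance (tiles : List (Int × Int × Int × Int)) (tile : Int × Int × Int × Int) (out : List Int × List Int) : Decidable (Spec_get_rowcol_indexes_py tiles tile out) := by unfold Spec_get_rowcol_indexes_py; infer_instance

-- ===== CLAIM (what is proved, stated in full; the proofs are below) =====
def Claim_equal_get_rowcol_indexes_py : Prop := ∀ (tiles : List (Int × Int × Int × Int)) (tile : Int × Int × Int × Int), Dom_get_rowcol_indexes_py tiles tile → Spec_get_rowcol_indexes_py tiles tile (get_rowcol_indexes_py tiles tile)

-- ===== LEMMAS AND PROOFS =====

-- ---- Part 1: sorted(set(l)) = pvDedupSorted l ----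

theorem pv_mem_le_getLast : ∀ (l : List Int), l.Pairwise (· < ·) → ∀ a ∈ l, ∀ (hne : l ≠ []),
    a ≤ l.getLast hne := by
  intro l
  induction l with
  | nil => intro _ a ha; cases ha
  | cons x xs ih =>
    intro h a ha _
    rcases xs with _ | ⟨y, ys⟩
    · simp only [List.mem_singleton] at ha
      simp [ha, List.getLast]
    · rw [List.getLast_cons (by simp)]
      rcases List.mem_cons.mp ha with rfl | hmem
      · exact le_of_lt ((List.pairwise_cons.mp h).1 _ (List.getLast_mem _))
      · exact ih (List.pairwise_cons.mp h).2 a hmem (by simp)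

theorem pv_fold_inv (vs : List Int) : ∀ (acc : List Int), vs.Pairwise (· ≤ ·) →
    acc.Pairwise (· < ·) → (∀ a ∈ acc, ∀ v ∈ vs, a ≤ v) →
    (vs.foldl (fun out v => if out.isEmpty || !(out.getLast? == some v) then out ++ [v] else out) acc).Pairwise (· < ·) ∧
    (∀ x, x ∈ vs.foldl (fun out v => if out.isEmpty || !(out.getLast? == some v) then out ++ [v] else out) acc ↔ (x ∈ acc ∨ x ∈ vs)) := by
  induction vs with
  | nil => intro acc _ hacc _; exact ⟨hacc, fun x => by simp⟩
  | cons v vs ih =>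
    intro acc hs hacc hmono
    obtain ⟨hv, hvs⟩ := List.pairwise_cons.mp hs
    rw [List.foldl_cons]
    by_cases hc : (acc.isEmpty || !(acc.getLast? == some v)) = true
    · rw [if_pos hc]
      have haccv : ∀ a ∈ acc, a < v := by
        intro a ha
        have hne : acc ≠ [] := by rintro rfl; cases ha
        have h1 : acc.getLast hne ≤ v := hmono _ (List.getLast_mem hne) v (by simp)
        have h2 : acc.getLast hne ≠ v := by
          intro he
          have hb : (acc.getLast? == some v) = true := by
            simp [List.getLast?_eq_some_getLast hne, he]
          simp [List.isEmpty_iff, hne, hb] at hc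
        have h3 : a ≤ acc.getLast hne := pv_mem_le_getLast acc hacc a ha hne
        omega
      have hpair : (acc ++ [v]).Pairwise (· < ·) := by
        rw [List.pairwise_append]
        refine ⟨hacc, List.pairwise_singleton _ _, fun a ha b hb => ?_⟩
        rw [List.mem_singleton] at hb; subst hb; exact haccv a ha
      have hmono' : ∀ a ∈ acc ++ [v], ∀ u ∈ vs, a ≤ u := by
        intro a ha u hu
        rcases List.mem_append.mp ha with h | h
        · exact hmono a h u (List.mem_cons_of_mem _ hu)
        · rw [List.mem_singleton] at h; subst h; exact hv u hu
      obtain ⟨hp, hm⟩ := ih (acc ++ [v]) hvs hpair hmono'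
      refine ⟨hp, fun x => ?_⟩
      rw [hm x]
      simp only [List.mem_append, List.mem_cons]
      tauto
    · rw [if_neg hc]
      have hvmem : v ∈ acc := by
        have hne : acc ≠ [] := by rintro rfl; simp at hc
        have hlast : acc.getLast? = some v := by
          by_contra hne2
          simp [List.isEmpty_iff, hne, hne2] at hc
        exact List.mem_of_getLast? hlast
      obtain ⟨hp, hm⟩ := ih acc hvs hacc (fun a ha u hu => hmono a ha u (List.mem_cons_of_mem _ hu))
      refine ⟨hp, fun x => ?_⟩
      rw [hm x]
      simp only [List.mem_cons]
      constructor
      · tauto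
      · rintro (h | rfl | h) <;> [exact Or.inl h; exact Or.inl hvmem; exact Or.inr h]

theorem pv_dedup_eq (l : List Int) :
    PySem.List.sorted (PySem.Set.ofList l) (fun x => x) false = pvDedupSorted l := by
  have hs : (PySem.List.sorted l (fun x => x) false).Pairwise (· ≤ ·) :=
    PySem.List.sorted_pairwise l (fun x => x)
  obtain ⟨hp, hm⟩ := pv_fold_inv (PySem.List.sorted l (fun x => x) false) []
    hs List.Pairwise.nil (by simp)
  have hnodup : (pvDedupSorted l).Nodup := (hp.imp fun h => ne_of_lt h)
  apply PySem.List.sorted_eq_of_perm_of_pairwise_lt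
  · refine (List.perm_ext_iff_of_nodup hnodup (PySem.Set.nodup_ofList l)).mpr fun x => ?_
    rw [show pvDedupSorted l = _ from rfl] at *
    rw [PySem.Set.mem_ofList]
    unfold pvDedupSorted
    rw [hm x]
    simp [PySem.List.mem_sorted]
  · exact hp

-- ---- Part 2: linear scan = binary search on a fst-strictly-increasing list ----

def pvScan (ps : List (Int × Int)) (t : Int × Int) (s : Int) : List Int :=
  ((PySem.List.enumerate ps s).filter (fun p => t == p.2)).map (fun p => p.1)

theorem pvScan_cons (x : Int × Int) (xs : List (Int × Int)) (t : Int × Int) (s : Int) :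
    pvScan (x :: xs) t s = (if t = x then [s] else []) ++ pvScan xs t (s + 1) := by
  by_cases h : t = x <;> simp [pvScan, PySem.List.enumerate_cons, h]

theorem pv_scan_none (ps : List (Int × Int)) (t : Int × Int) :
    ∀ s : Int, (∀ (k : Nat) (hk : k < ps.length), ps[k] ≠ t) → pvScan ps t s = [] := by
  induction ps with
  | nil => intro s _; simp [pvScan, PySem.List.enumerate_nil]
  | cons x xs ih =>
    intro s h
    rw [pvScan_cons]
    have hx : ¬ t = x := by
      intro he; exact h 0 (by simp) (by simp [he])
    rw [if_neg hx, List.nil_append]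
    exact ih (s + 1) (fun k hk => by
      have := h (k + 1) (by simpa using Nat.succ_lt_succ hk)
      simpa using this)

theorem pv_scan_unique (ps : List (Int × Int)) (t : Int × Int) :
    ∀ (s : Int) (i : Nat), i < ps.length →
    (∀ (k : Nat) (hk : k < ps.length), ps[k] = t ↔ k = i) → pvScan ps t s = [s + i] := by
  induction ps with
  | nil => intro s i hi _; simp at hi
  | cons x xs ih =>
    intro s i hi h
    rw [pvScan_cons]
    cases i with
    | zero =>
      have hx : x = t := (h 0 (by simp)).mpr rfl
      subst hx
      have hnone : pvScan xs x (s + 1) = [] := pv_scan_none xs x (s + 1) (fun k hk => by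
        have := h (k + 1) (by simpa using Nat.succ_lt_succ hk)
        simpa using this)
      simp [hnone]
    | succ j =>
      have hx : ¬ t = x := by
        intro he
        have := (h 0 (by simp)).mp (by simp [he])
        omega
      rw [if_neg hx, List.nil_append]
      have hj : j < xs.length := by simpa using hi
      rw [ih (s + 1) j hj (fun k hk => by
        have := h (k + 1) (by simpa using Nat.succ_lt_succ hk)
        simpa using this)]
      congr 1
      push_cast
      ring

theorem pvLexLt_iff (a b : Int × Int) :
    pvLexLt a b = true ↔ (a.1 < b.1 ∨ (a.1 = b.1 ∧ a.2 < b.2)) := by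
  simp [pvLexLt]

theorem pv_bsLoop_inv (lst : List (Int × Int)) (t : Int × Int)
    (hs : lst.Pairwise (fun a b => a.1 < b.1)) :
    ∀ (n lo hi : Nat), hi - lo = n → lo ≤ hi → hi ≤ lst.length →
    (∀ k, k < lo → pvLexLt (lst.getD k (0,0)) t = true) →
    (∀ k, hi ≤ k → k < lst.length → pvLexLt (lst.getD k (0,0)) t = false) →
    (∀ k, k < pvBsLoop lst t lo hi → pvLexLt (lst.getD k (0,0)) t = true) ∧
    (∀ k, pvBsLoop lst t lo hi ≤ k → k < lst.length → pvLexLt (lst.getD k (0,0)) t = false) ∧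
    pvBsLoop lst t lo hi ≤ lst.length := by
  have hget : ∀ i j, i < j → j < lst.length → (lst.getD i (0,0)).1 < (lst.getD j (0,0)).1 := by
    intro i j hij hj
    rw [List.getD_eq_getElem _ _ (by omega), List.getD_eq_getElem _ _ hj]
    exact List.pairwise_iff_getElem.mp hs i j (by omega) hj hij
  intro n
  induction n using Nat.strong_induction_on with
  | _ n ih =>
    intro lo hi hn hlh hhl hP hQ
    rw [pvBsLoop]
    by_cases h : lo < hi
    · simp only [if_pos h]
      by_cases hm : pvLexLt (lst.getD ((lo + hi) / 2) (0,0)) t = true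
      · simp only [hm, if_pos]
        refine ih (hi - ((lo + hi) / 2 + 1)) (by omega) ((lo + hi) / 2 + 1) hi rfl
          (by omega) hhl (fun k hk => ?_) hQ
        rcases Nat.lt_or_ge k ((lo + hi) / 2) with hk2 | hk2
        · have hfst := hget k ((lo + hi) / 2) hk2 (by omega)
          rw [pvLexLt_iff] at hm ⊢
          left; omega
        · have : k = (lo + hi) / 2 := by omega
          rw [this]; exact hm
      · simp only [if_neg hm]
        refine ih ((lo + hi) / 2 - lo) (by omega) lo ((lo + hi) / 2) rfl
          (by omega) (by omega) hP (fun k hk hklen => ?_)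
        rcases Nat.lt_or_ge k hi with hk2 | hk2
        · rcases Nat.eq_or_lt_of_le hk with hk3 | hk3
          · rw [← hk3]; exact Bool.eq_false_iff.mpr hm
          · have hfst := hget ((lo + hi) / 2) k hk3 hklen
            rw [Bool.eq_false_iff]
            intro hcon
            rw [pvLexLt_iff] at hcon
            have hmle : t.1 ≤ (lst.getD ((lo + hi) / 2) (0,0)).1 := by
              by_contra hcon2
              exact hm ((pvLexLt_iff _ _).mpr (Or.inl (by omega)))
            rcases hcon with h1 | ⟨h1, _⟩ <;> omega
        · exact hQ k hk2 hklen
    · simp only [if_neg h]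
      have : lo = hi := by omega
      exact ⟨hP, fun k hk hklen => hQ k (by omega) hklen, by omega⟩

theorem pv_search_eq (ps : List (Int × Int)) (t : Int × Int)
    (hs : ps.Pairwise (fun a b => a.1 < b.1)) : pvScan ps t 0 = pvBsearch ps t := by
  obtain ⟨hP, hQ, hle⟩ := pv_bsLoop_inv ps t hs (ps.length - 0) 0 ps.length rfl
    (by omega) le_rfl (fun k hk => absurd hk (by omega)) (fun k h1 h2 => absurd h2 (by omega))
  have hget : ∀ i j, i < j → j < ps.length → (ps.getD i (0,0)).1 < (ps.getD j (0,0)).1 := by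
    intro i j hij hj
    rw [List.getD_eq_getElem _ _ (by omega), List.getD_eq_getElem _ _ hj]
    exact List.pairwise_iff_getElem.mp hs i j (by omega) hj hij
  set r := pvBsLoop ps t 0 ps.length with hr
  by_cases hcase : r < ps.length ∧ ps.getD r (0,0) = t
  · have heq : pvBsearch ps t = [(r : Int)] := by
      simp only [pvBsearch, ← hr]
      split_ifs with hb
      · rfl
      · exfalso
        simp only [Bool.and_eq_true, decide_eq_true_eq, beq_iff_eq] at hb
        exact hb ⟨hcase.1, hcase.2⟩
    rw [heq]
    have h0 : ((0 : Int) + (r : Int)) = (r : Int) := by omega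
    rw [← h0]
    apply pv_scan_unique ps t 0 r hcase.1
    intro k hk
    constructor
    · intro hkt
      by_contra hne
      rcases Nat.lt_or_ge k r with hlt | hge
      · have := hP k hlt
        rw [List.getD_eq_getElem _ _ hk, hkt, pvLexLt_iff] at this
        omega
      · have hgt : r < k := by omega
        have hfst := hget r k hgt hk
        rw [List.getD_eq_getElem _ _ hk, hkt, hcase.2] at hfst
        omega
    · rintro rfl
      rw [← List.getD_eq_getElem _ (0,0) hk]
      exact hcase.2
  · have heq : pvBsearch ps t = [] := by
      simp only [pvBsearch, ← hr]
      split_ifs with hb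
      · exfalso
        simp only [Bool.and_eq_true, decide_eq_true_eq, beq_iff_eq] at hb
        exact hcase ⟨hb.1, hb.2⟩
      · rfl
    rw [heq]
    apply pv_scan_none
    intro k hk hkt
    rcases Nat.lt_or_ge k r with hlt | hge
    · have := hP k hlt
      rw [List.getD_eq_getElem _ _ hk, hkt, pvLexLt_iff] at this
      omega
    · have hrlen : r < ps.length := by omega
      have hrt : ps.getD r (0,0) ≠ t := fun he => hcase ⟨hrlen, he⟩
      have hkt' : ps.getD k (0,0) = t := by
        rw [List.getD_eq_getElem _ _ hk]; exact hkt
      rcases Nat.eq_or_lt_of_le hge with heq2 | hlt2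
      · exact hrt (heq2.symm ▸ hkt')
      · have hfst := hget r k hlt2 hk
        have := hQ r le_rfl hrlen
        rw [Bool.eq_false_iff] at this
        apply this
        rw [pvLexLt_iff]
        rw [List.getD_eq_getElem _ _ hk, hkt] at hfst
        left
        omega

theorem pv_zip_pairwise_fst (a b : List Int) (h : a.Pairwise (· < ·)) :
    (a.zip b).Pairwise (fun p q : Int × Int => p.1 < q.1) := by
  rw [List.pairwise_iff_getElem] at h ⊢
  intro i j hi hj hij
  have hl : (a.zip b).length = min a.length b.length := List.length_zip
  have hia : i < a.length := by omega
  have hja : j < a.length := by omega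
  have hib : i < b.length := by omega
  have hjb : j < b.length := by omega
  simp only [List.getElem_zip]
  exact h i j hia hja hij

-- ===== VERDICT (by name: the statement is the Claim_ definition above) =====
theorem get_rowcol_indexes_py_spec : Claim_equal_get_rowcol_indexes_py := by
  intro tiles tile _
  unfold Spec_get_rowcol_indexes_py get_rowcol_indexes_py get_rowcol_indexes_py_alt
  simp only [← pv_dedup_eq]
  have h1 := PySem.List.sorted_ofList_pairwise_lt (tiles.map (fun i => i.1))
  have h2 := PySem.List.sorted_ofList_pairwise_lt (tiles.map (fun i => i.2.1))
  refine Prod.ext ?_ ?_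
  · exact pv_search_eq _ _ (pv_zip_pairwise_fst _ _ h2)
  · exact pv_search_eq _ _ (pv_zip_pairwise_fst _ _ h1)
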